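-- pv_equiv track=rewrite | github.com/SebastianObi/ConfigInterfaceTool | bin/main.py | process_wizard_group_status
-- ===== SOURCE A (Python) =====
-- def process_wizard_group_status(group, current, lng_key=""):
--     if group == "" or current == "":
--         return ""
--
--     ret = ""
--
--     found = False
--
--     group = group.replace(",", ";")
--     group = group.split(";")
--     for x in group:
--         x = x.strip()
--         if x == current:
--             found = True
--             ret = ret + "<span class='wizard_status active'></span>"
--         elif found == False:
--             ret = ret + "<span class='wizard_status active'></span>"
--         else:
--             ret = ret + "<span class='wizard_status'></span>"
--     return ret
-- ===== SOURCE B (Python) =====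
-- def process_wizard_group_status(group, current, lng_key=""):
--     if group == "" or current == "":
--         return ""
--     items = [x.strip() for x in group.replace(",", ";").split(";")]
--     try:
--         cut = items.index(current)
--     except ValueError:
--         cut = len(items)
--     return "".join(
--         "<span class='wizard_status active'></span>" if i <= cut or x == current
--         else "<span class='wizard_status'></span>"
--         for i, x in enumerate(items)
--     )
-- ===== Notes on version B (the rewrite author's own statement) =====
-- stated objective: alternative
-- what changed: The flag-driven state machine accumulating a string is replaced by precomputing the index of the first item equal to current (sentinel len if absent) and joining per-element spans chosen by 'i <= cutoff or item == current'.
import Mathlib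
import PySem

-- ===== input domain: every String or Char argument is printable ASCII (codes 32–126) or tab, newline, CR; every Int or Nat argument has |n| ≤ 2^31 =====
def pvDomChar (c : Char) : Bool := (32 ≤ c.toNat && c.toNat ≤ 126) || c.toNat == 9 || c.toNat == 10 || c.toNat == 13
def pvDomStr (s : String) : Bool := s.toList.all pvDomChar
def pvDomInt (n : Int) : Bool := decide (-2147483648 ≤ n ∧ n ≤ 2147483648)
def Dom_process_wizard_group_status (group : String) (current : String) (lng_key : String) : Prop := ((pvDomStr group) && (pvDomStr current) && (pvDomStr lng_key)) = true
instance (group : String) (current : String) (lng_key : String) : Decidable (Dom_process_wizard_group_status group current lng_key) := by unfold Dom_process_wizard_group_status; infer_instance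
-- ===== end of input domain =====

-- B replaces A's found-flag state machine by a precomputed first-match cutoff index consulted per element (alternative decomposition, same cost).


-- ===== PORT A =====
-- split? returns some for the non-empty separator ";", so the .getD [] is only a totality guard
def process_wizard_group_status (group : String) (current : String) (lng_key : String) : String :=
  if group = "" ∨ current = "" then ""
  else
    let group1 := PySem.Str.replace group "," ";"
    let group2 := (PySem.Str.split? group1 ";").getD []
    let st := group2.foldl (fun (st : String × Bool) x =>
      let x := PySem.Str.strip x
      if x = current then (st.1 ++ "<span class='wizard_status active'></span>", true)
      else if st.2 = false then (st.1 ++ "<span class='wizard_status active'></span>", st.2)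
      else (st.1 ++ "<span class='wizard_status'></span>", st.2)) ("", false)
    st.1

-- ===== PORT B =====
def process_wizard_group_status_alt (group : String) (current : String) (lng_key : String) : String :=
  if group = "" ∨ current = "" then ""
  else
    let items := ((PySem.Str.split? (PySem.Str.replace group "," ";") ";").getD []).map PySem.Str.strip
    let cut : Nat := (PySem.List.index? items current).getD items.length
    PySem.Str.join "" ((PySem.List.enumerate items 0).map (fun p =>
      if p.1 ≤ (cut : Int) ∨ p.2 = current then "<span class='wizard_status active'></span>"
      else "<span class='wizard_status'></span>"))

-- ===== PRECONDITION & SPEC =====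
def Spec_process_wizard_group_status (group : String) (current : String) (lng_key : String) (out : String) : Prop := out = process_wizard_group_status_alt group current lng_key
instance (group : String) (current : String) (lng_key : String) (out : String) : Decidable (Spec_process_wizard_group_status group current lng_key out) := by unfold Spec_process_wizard_group_status; infer_instance

-- ===== CLAIM (what is proved, stated in full; the proofs are below) =====
def Claim_equal_process_wizard_group_status : Prop := ∀ (group : String) (current : String) (lng_key : String), Dom_process_wizard_group_status group current lng_key → Spec_process_wizard_group_status group current lng_key (process_wizard_group_status group current lng_key)

-- ===== LEMMAS AND PROOFS =====

-- a pure description of A's loop on an already-stripped list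
def pvRender (current : String) : List String → Bool → String
  | [], _ => ""
  | x :: xs, found =>
    (if x = current ∨ found = false then "<span class='wizard_status active'></span>"
     else "<span class='wizard_status'></span>") ++ pvRender current xs (found || decide (x = current))

lemma pvFoldA (current : String) (l : List String) (acc : String) (found : Bool) :
    (l.foldl (fun (st : String × Bool) x =>
      let x := PySem.Str.strip x
      if x = current then (st.1 ++ "<span class='wizard_status active'></span>", true)
      else if st.2 = false then (st.1 ++ "<span class='wizard_status active'></span>", st.2)
      else (st.1 ++ "<span class='wizard_status'></span>", st.2)) (acc, found)).1
    = acc ++ pvRender current (l.map PySem.Str.strip) found := by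
  induction l generalizing acc found with
  | nil => simp [pvRender]
  | cons x xs ih =>
    by_cases hx : PySem.Str.strip x = current
    · simp [pvRender, hx, ih, String.append_assoc]
    · cases found with
      | false => simp [pvRender, hx, ih, String.append_assoc]
      | true => simp [pvRender, hx, ih, String.append_assoc]

lemma pvJoinCons (a : String) (rest : List String) :
    PySem.Str.join "" (a :: rest) = a ++ PySem.Str.join "" rest := by
  have h : ("" : String).toList = [] := by decide
  cases rest with
  | nil => simp [PySem.Str.join, h, PySem.Chars.join_singleton, PySem.Chars.join_nil]
  | cons b r => simp [PySem.Str.join, h, PySem.Chars.join_cons_cons]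

lemma pvRenderTrue (current : String) (l : List String) (s : Int) :
    pvRender current l true
    = PySem.Str.join "" ((PySem.List.enumerate l s).map (fun p =>
        if p.2 = current then "<span class='wizard_status active'></span>"
        else "<span class='wizard_status'></span>")) := by
  induction l generalizing s with
  | nil => simp [pvRender, PySem.Str.join, PySem.Chars.join_nil, PySem.List.enumerate]
  | cons x xs ih =>
    rw [PySem.List.enumerate_cons, List.map_cons, pvJoinCons, ← ih (s + 1)]
    by_cases hx : x = current <;> simp [pvRender, hx]

lemma pvCutSucc (current x : String) (xs : List String) (hx : x ≠ current) :
    ((PySem.List.index? (x :: xs) current).getD (x :: xs).length : Int)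
    = ((PySem.List.index? xs current).getD xs.length : Int) + 1 := by
  rw [PySem.List.index?_cons_of_ne xs hx]
  cases h : PySem.List.index? xs current with
  | none => simp
  | some k => simp

lemma pvRenderFalse (current : String) (l : List String) (s : Int) :
    pvRender current l false
    = PySem.Str.join "" ((PySem.List.enumerate l s).map (fun p =>
        if p.1 ≤ s + (((PySem.List.index? l current).getD l.length : Nat) : Int) ∨ p.2 = current
        then "<span class='wizard_status active'></span>"
        else "<span class='wizard_status'></span>")) := by
  induction l generalizing s with
  | nil => simp [pvRender, PySem.Str.join, PySem.Chars.join_nil, PySem.List.enumerate]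
  | cons x xs ih =>
    rw [PySem.List.enumerate_cons, List.map_cons, pvJoinCons]
    by_cases hx : x = current
    · subst hx
      simp only [PySem.List.index?_cons_self, Option.getD_some, Nat.cast_zero, add_zero]
      have htail : ((PySem.List.enumerate xs (s + 1)).map (fun p =>
          if p.1 ≤ s ∨ p.2 = x then "<span class='wizard_status active'></span>"
          else "<span class='wizard_status'></span>"))
          = ((PySem.List.enumerate xs (s + 1)).map (fun p =>
          if p.2 = x then "<span class='wizard_status active'></span>"
          else "<span class='wizard_status'></span>")) := by
        apply List.map_congr_left
        intro p hp
        rcases (PySem.List.mem_enumerate_iff xs (s + 1) p).1 hp with ⟨k, hk, rfl⟩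
        have hns : ¬ ((s + 1 + (k : Int)) ≤ s) := by omega
        simp [hns]
      rw [htail, ← pvRenderTrue x xs (s + 1)]
      simp [pvRender]
    · have hcut := pvCutSucc current x xs hx
      have hc0 : (0 : Int) ≤ (((PySem.List.index? xs current).getD xs.length : Nat) : Int) :=
        Int.natCast_nonneg _
      have hhead : (if (s : Int) ≤ s + (((PySem.List.index? (x :: xs) current).getD (x :: xs).length : Nat) : Int) ∨ x = current
          then "<span class='wizard_status active'></span>"
          else "<span class='wizard_status'></span>") = "<span class='wizard_status active'></span>" := by
        rw [hcut, if_pos (Or.inl (by omega))]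
      have htail : ((PySem.List.enumerate xs (s + 1)).map (fun p =>
          if p.1 ≤ s + (((PySem.List.index? (x :: xs) current).getD (x :: xs).length : Nat) : Int) ∨ p.2 = current
          then "<span class='wizard_status active'></span>"
          else "<span class='wizard_status'></span>"))
          = ((PySem.List.enumerate xs (s + 1)).map (fun p =>
          if p.1 ≤ (s + 1) + (((PySem.List.index? xs current).getD xs.length : Nat) : Int) ∨ p.2 = current
          then "<span class='wizard_status active'></span>"
          else "<span class='wizard_status'></span>")) := by
        apply List.map_congr_left
        intro p _
        rw [hcut]
        have harith : (s + ((((PySem.List.index? xs current).getD xs.length : Nat) : Int) + 1))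
             = ((s + 1) + (((PySem.List.index? xs current).getD xs.length : Nat) : Int)) := by ring
        rw [harith]
      rw [hhead, htail, ← ih (s + 1)]
      simp [pvRender, hx]

-- ===== VERDICT (by name: the statement is the Claim_ definition above) =====
theorem process_wizard_group_status_spec : Claim_equal_process_wizard_group_status := by
  intro group current lng_key _
  unfold Spec_process_wizard_group_status process_wizard_group_status process_wizard_group_status_alt
  by_cases h : group = "" ∨ current = ""
  · simp [h]
  · simp only [h, if_false]
    rw [pvFoldA]
    rw [pvRenderFalse current _ 0]
    simp
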